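-- pv_equiv track=rewrite | github.com/devolo/adaptavist | adaptavist/adaptavist.py | update_list
-- ===== SOURCE A (Python) =====
-- def update_list(content, new_values):
--     """Update a list with additional or new values."""
--     new_content = content[:] if content else []
--     new_values = [x.strip() for x in new_values.split(",")] if isinstance(new_values, str) else new_values or []
--     for value in new_values:
--         if value == "-":
--             new_content.clear()
--         elif value and value not in new_content:
--             new_content.append(value)
--     return new_content
-- ===== SOURCE B (Python) =====
-- def update_list(content, new_values):
--     """Update a list with additional or new values."""
--     vals = [x.strip() for x in new_values.split(",")] if isinstance(new_values, str) else new_values or []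
--     # scan from the right: collect the values after the LAST '-' (if any)
--     tail = []
--     cleared = False
--     for v in reversed(vals):
--         if v == "-":
--             cleared = True
--             break
--         tail.append(v)
--     tail.reverse()
--     out = [] if cleared else (list(content) if content else [])
--     for v in tail:
--         if v and v not in out:
--             out.append(v)
--     return out
-- ===== Notes on version B (the rewrite author's own statement) =====
-- stated objective: alternative
-- what changed: B locates the last '-' by a single reverse scan with early exit and then deduplicates only the values after it, instead of A's forward pass that repeatedly clears the accumulated list at every '-'.
import Mathlib
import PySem

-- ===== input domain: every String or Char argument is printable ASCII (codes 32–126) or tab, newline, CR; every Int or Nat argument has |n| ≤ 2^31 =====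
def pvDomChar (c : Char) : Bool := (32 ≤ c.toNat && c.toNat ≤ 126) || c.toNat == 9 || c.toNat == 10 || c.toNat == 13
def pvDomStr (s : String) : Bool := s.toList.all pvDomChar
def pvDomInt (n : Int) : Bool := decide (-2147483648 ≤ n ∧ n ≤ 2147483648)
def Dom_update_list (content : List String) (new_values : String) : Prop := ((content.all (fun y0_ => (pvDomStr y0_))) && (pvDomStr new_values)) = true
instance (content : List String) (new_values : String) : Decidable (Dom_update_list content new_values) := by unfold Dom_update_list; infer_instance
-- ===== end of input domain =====

-- ===== PORT A =====
def pvStepA (acc : List String) (value : String) : List String :=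
  if value = "-" then [] else if value ≠ "" ∧ value ∉ acc then acc ++ [value] else acc

-- port of A: copy content, split/strip new_values, then one forward loop (clear on '-')
def update_list (content : List String) (new_values : String) : List String :=
  let new_content := content
  let vals := (((PySem.Str.split? new_values ",").getD [])).map (fun x => PySem.Str.strip x)
  vals.foldl pvStepA new_content

-- ===== PORT B =====
def pvStepB (out : List String) (v : String) : List String :=
  if v ≠ "" ∧ v ∉ out then out ++ [v] else out

-- reverse scan with early break: (hit a '-', values collected before the break)
def pvScanRev : List String → List String → Bool × List String
  | [], tail => (false, tail)
  | v :: rest, tail => if v = "-" then (true, tail) else pvScanRev rest (tail ++ [v])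

-- port of B: find the suffix after the LAST '-' by a reverse scan, dedup only that suffix
def update_list_alt (content : List String) (new_values : String) : List String :=
  let vals := (((PySem.Str.split? new_values ",").getD [])).map (fun x => PySem.Str.strip x)
  let ct := pvScanRev vals.reverse []
  let base := if ct.1 then [] else content
  ct.2.reverse.foldl pvStepB base

-- ===== PRECONDITION & SPEC =====
def Spec_update_list (content : List String) (new_values : String) (out : List String) : Prop := out = update_list_alt content new_values
instance (content : List String) (new_values : String) (out : List String) : Decidable (Spec_update_list content new_values out) := by unfold Spec_update_list; infer_instance

-- ===== CLAIM (what is proved, stated in full; the proofs are below) =====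
def Claim_equal_update_list : Prop := ∀ (content : List String) (new_values : String), Dom_update_list content new_values → Spec_update_list content new_values (update_list content new_values)

-- ===== LEMMAS AND PROOFS =====

lemma pvScanRev_acc (rev acc : List String) :
    pvScanRev rev acc = ((pvScanRev rev []).1, acc ++ (pvScanRev rev []).2) := by
  induction rev generalizing acc with
  | nil => simp [pvScanRev]
  | cons v rest ih =>
    by_cases h : v = "-"
    · simp [pvScanRev, h]
    · rw [pvScanRev, pvScanRev, if_neg h, if_neg h, ih (acc ++ [v]), ih ([] ++ [v])]
      simp

lemma pv_key (vals init : List String) :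
    vals.foldl pvStepA init =
      (pvScanRev vals.reverse []).2.reverse.foldl pvStepB
        (if (pvScanRev vals.reverse []).1 then [] else init) := by
  induction vals using List.reverseRecOn generalizing init with
  | nil => simp [pvScanRev]
  | append_singleton ys v ih =>
    rw [List.foldl_append, List.reverse_append]
    by_cases h : v = "-"
    · simp [pvScanRev, h, pvStepA]
    · simp only [List.reverse_singleton, List.singleton_append, pvScanRev, if_neg h]
      rw [pvScanRev_acc]
      simp only [List.foldl_cons, List.reverse_append, List.foldl_append,
        List.reverse_singleton, List.singleton_append, List.foldl_nil]
      rw [ih init]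
      simp [pvStepA, pvStepB, h]

-- ===== VERDICT (by name: the statement is the Claim_ definition above) =====
theorem update_list_spec : Claim_equal_update_list := by
  intro content new_values _
  unfold Spec_update_list update_list update_list_alt
  exact pv_key _ _
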